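-- pv_equiv track=rewrite | github.com/hempnall/aoc2023 | day21/a.py | count_odds_and_evens
-- ===== SOURCE A (Python) =====
-- def count_odds_and_evens( lines ):
--     odds=set([])
--     evens=set([])
--     for ridx, ln in enumerate(lines):
--         if ridx == 0:
--             for cidx , _ in enumerate(ln):
--                 if cidx % 2 == 0:
--                     evens.add((cidx,ridx))
--                 else:
--                     odds.add((cidx,ridx))
--         else:
--             for cidx , c in enumerate(ln):
--                 if c == "#":
--                     continue
--                 prev=(cidx,ridx-1)
--                 coord=(cidx,ridx)
--                 if prev in evens:
--                     odds.add(coord)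
--                 if prev in odds:
--                     evens.add(coord)
--                 if coord in odds and coord in evens:
--                     raise "whoops"
--     return len(odds),len(evens)
-- ===== SOURCE B (Python) =====
-- def count_odds_and_evens(lines):
--     # Column-wise walk: for each column of row 0, count it by column parity,
--     # then walk down the rows flipping parity while the chain is unbroken.
--     if not lines:
--         return (0, 0)
--     odds = 0
--     evens = 0
--     for c in range(len(lines[0])):
--         parity = c % 2
--         if parity == 0:
--             evens += 1
--         else:
--             odds += 1
--         for r in range(1, len(lines)):
--             ln = lines[r]
--             if c >= len(ln) or ln[c] == '#':
--                 break
--             parity = 1 - parity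
--             if parity == 0:
--                 evens += 1
--             else:
--                 odds += 1
--     return (odds, evens)
-- ===== Notes on version B (the rewrite author's own statement) =====
-- stated objective: faster
-- what changed: Replaces the row-by-row scan that builds two hash sets of coordinate tuples (membership-testing the cell above) with a column-by-column downward walk that keeps only two integer counters and a running parity, stopping at the first '#' or short line.
import Mathlib
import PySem

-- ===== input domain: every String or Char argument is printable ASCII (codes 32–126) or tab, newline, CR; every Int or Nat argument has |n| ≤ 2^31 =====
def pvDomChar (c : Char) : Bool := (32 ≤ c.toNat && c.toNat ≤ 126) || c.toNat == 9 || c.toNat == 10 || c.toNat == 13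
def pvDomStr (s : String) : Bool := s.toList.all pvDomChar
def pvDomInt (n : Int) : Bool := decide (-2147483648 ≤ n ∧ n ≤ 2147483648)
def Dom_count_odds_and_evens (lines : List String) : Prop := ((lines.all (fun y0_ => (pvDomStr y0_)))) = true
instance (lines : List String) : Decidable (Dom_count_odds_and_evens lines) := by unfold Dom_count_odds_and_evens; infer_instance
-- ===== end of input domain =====

-- B replaces A's row-by-row scan that builds two coordinate sets (membership-testing the
-- cell above) with a column-by-column downward walk keeping two integer counters and a
-- running parity (same O(cells) asymptotics, O(1) extra space; a timing run measured
-- B as constant-factor faster).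

-- ===== PORT A =====
-- One step of A's outer loop: the body for (ridx, ln).  A's 'raise "whoops"' branch
-- ('if coord in odds and coord in evens') can never fire — a coordinate is only ever
-- added to one of the two sets — so no case for it is needed: the state is returned as is.
def pvAStep (st : PySem.Set (Int × Int) × PySem.Set (Int × Int)) (p : Int × String) :
    PySem.Set (Int × Int) × PySem.Set (Int × Int) :=
  let ridx := p.1
  if ridx = 0 then
    (PySem.List.enumerate p.2.toList 0).foldl
      (fun st q =>
        if q.1 % 2 = 0 then (st.1, PySem.Set.add st.2 (q.1, ridx))
        else (PySem.Set.add st.1 (q.1, ridx), st.2)) st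
  else
    (PySem.List.enumerate p.2.toList 0).foldl
      (fun st q =>
        if q.2 = '#' then st
        else
          let prev : Int × Int := (q.1, ridx - 1)
          let coord : Int × Int := (q.1, ridx)
          let odds := if PySem.Set.contains st.2 prev then PySem.Set.add st.1 coord else st.1
          let evens := if PySem.Set.contains odds prev then PySem.Set.add st.2 coord else st.2
          (odds, evens)) st

def count_odds_and_evens (lines : List String) : Int × Int :=
  let st := (PySem.List.enumerate lines 0).foldl pvAStep (PySem.Set.empty, PySem.Set.empty)
  (PySem.Set.len st.1, PySem.Set.len st.2)

-- ===== PORT B =====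
-- the inner "for r in range(1, len(lines)): ... break" loop of Source B, walking down one column
def pvColDown (rows : List (List Char)) (c : Nat) (parity : Nat) (odds evens : Int) : Int × Int :=
  match rows with
  | [] => (odds, evens)
  | ln :: rest =>
    match ln[c]? with
    | none => (odds, evens)                  -- c >= len(ln): break
    | some ch =>
      if ch = '#' then (odds, evens)         -- break
      else
        let parity' := 1 - parity
        if parity' = 0 then pvColDown rest c parity' odds (evens + 1)
        else pvColDown rest c parity' (odds + 1) evens

def count_odds_and_evens_alt (lines : List String) : Int × Int :=
  match lines with
  | [] => (0, 0)
  | l0 :: rest =>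
    (List.range l0.toList.length).foldl
      (fun (acc : Int × Int) c =>
        let parity := c % 2
        let acc' := if parity = 0 then (acc.1, acc.2 + 1) else (acc.1 + 1, acc.2)
        pvColDown (rest.map String.toList) c parity acc'.1 acc'.2)
      (0, 0)

-- ===== PRECONDITION & SPEC =====
def Spec_count_odds_and_evens (lines : List String) (out : Int × Int) : Prop := out = count_odds_and_evens_alt lines
instance (lines : List String) (out : Int × Int) : Decidable (Spec_count_odds_and_evens lines out) := by unfold Spec_count_odds_and_evens; infer_instance

-- ===== CLAIM (what is proved, stated in full; the proofs are below) =====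
def Claim_equal_count_odds_and_evens : Prop := ∀ (lines : List String), Dom_count_odds_and_evens lines → Spec_count_odds_and_evens lines (count_odds_and_evens lines)

-- ===== LEMMAS AND PROOFS =====

def pvOkRow (ln : List Char) (c : Nat) : Bool :=
  match ln[c]? with
  | some ch => ch != '#'
  | none => false

def pvChain : List (List Char) → Nat → Nat
  | [], _ => 0
  | ln :: rest, c => if pvOkRow ln c then pvChain rest c + 1 else 0

def pvRun (L : List (List Char)) (c : Nat) : Nat :=
  match L with
  | [] => 0
  | l0 :: rest => if c < l0.length then pvChain rest c + 1 else 0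

def pvAlive (L : List (List Char)) (c : Nat) : Nat → Bool
  | 0 => match L[0]? with | some ln => decide (c < ln.length) | none => false
  | r + 1 => pvAlive L c r &&
      (match L[r + 1]? with | some ln => pvOkRow ln c | none => false)

def pvRowL (L : List (List Char)) (p r : Nat) : List (Int × Int) :=
  (List.range (L.getD r []).length).filterMap
    (fun c => if pvAlive L c r ∧ (c + r) % 2 = p then some ((c : Int), (r : Int)) else none)

def pvBlocks (L : List (List Char)) (p k : Nat) : List (Int × Int) :=
  (List.range k).flatMap (fun r => pvRowL L p r)

def pvCnt (L : List (List Char)) (c p : Nat) : Nat :=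
  ∑ r ∈ Finset.range (pvRun L c), if (c + r) % 2 = p then 1 else 0

theorem pvChain_lt_iff (rest : List (List Char)) (c : Nat) :
    ∀ r, r < pvChain rest c ↔ ∀ j ≤ r, (match rest[j]? with
      | some ln => pvOkRow ln c | none => false) = true := by
  induction rest with
  | nil =>
    intro r
    constructor
    · intro h; simp [pvChain] at h
    · intro h; have := h 0 (Nat.zero_le r); simp at this
  | cons ln rest ih =>
    intro r
    by_cases h : pvOkRow ln c
    · cases r with
      | zero =>
        simp only [pvChain, h, if_true]
        constructor
        · intro _ j hj; interval_cases j; simpa using h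
        · intro _; omega
      | succ r' =>
        constructor
        · intro hlt j hj
          have hr' : r' < pvChain rest c := by simp [pvChain, h] at hlt; omega
          cases j with
          | zero => simpa using h
          | succ j' => simpa using (ih r').1 hr' j' (by omega)
        · intro hall
          have : r' < pvChain rest c := (ih r').2 (fun j hj => by simpa using hall (j+1) (by omega))
          simp [pvChain, h]; omega
    · constructor
      · intro hlt; simp [pvChain, h] at hlt
      · intro hall; have := hall 0 (Nat.zero_le r); simp at this; exact absurd this h

theorem pvAlive_iff_run (l0 : List Char) (rest : List (List Char)) (c r : Nat) :
    pvAlive (l0 :: rest) c r = decide (r < pvRun (l0 :: rest) c) := by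
  induction r with
  | zero =>
    by_cases h : c < l0.length <;> simp [pvAlive, pvRun, h]
  | succ r ih =>
    by_cases h : c < l0.length
    · have hrun : pvRun (l0 :: rest) c = pvChain rest c + 1 := by simp [pvRun, h]
      simp only [pvAlive, ih, hrun]
      have hget : (l0 :: rest)[r + 1]? = rest[r]? := by simp
      rw [hget]
      rcases Nat.lt_or_ge r (pvChain rest c + 1) with hr | hr
      · have hforall := pvChain_lt_iff rest c
        by_cases hok : (match rest[r]? with
            | some ln => pvOkRow ln c | none => false) = true
        · have : r < pvChain rest c := by
            apply (hforall r).2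
            intro j hjr
            rcases Nat.lt_or_ge j r with hlt | hge
            · exact (hforall j).1 (by omega) j (le_refl j)
            · have : j = r := by omega
              subst this; exact hok
          simp [hok, hr, this]
        · have : ¬ (r < pvChain rest c) := fun hc => hok ((hforall r).1 hc r (le_refl r))
          rw [Bool.not_eq_true] at hok
          simp [hr, hok]
          omega
      · have h2 : ¬ (r < pvChain rest c + 1) := by omega
        simp [h2]
        omega
    · have hrun : pvRun (l0 :: rest) c = 0 := by simp [pvRun, h]
      simp [pvAlive, ih, hrun]

theorem pvRun_le_length (L : List (List Char)) (c : Nat) : pvRun L c ≤ L.length := by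
  cases L with
  | nil => simp [pvRun]
  | cons l0 rest =>
    by_cases h : c < l0.length
    · simp only [pvRun, h, if_true, List.length_cons]
      have : ∀ rs : List (List Char), pvChain rs c ≤ rs.length := by
        intro rs
        induction rs with
        | nil => simp [pvChain]
        | cons ln rs ih => by_cases hok : pvOkRow ln c <;> simp [pvChain, hok] <;> omega
      have := this rest; omega
    · simp [pvRun, h]

theorem pvAlive_width (l0 : List Char) (rest : List (List Char)) (c r : Nat)
    (h : pvAlive (l0 :: rest) c r = true) : c < l0.length := by
  rw [pvAlive_iff_run] at h
  simp only [decide_eq_true_eq] at h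
  by_contra hc
  simp [pvRun, hc] at h

theorem pvAlive_inrow (L : List (List Char)) (c r : Nat)
    (h : pvAlive L c r = true) : c < (L.getD r []).length := by
  cases r with
  | zero =>
    unfold pvAlive at h
    rcases hg : L[0]? with _ | ln
    · simp [hg] at h
    · simp only [hg] at h
      have : L.getD 0 [] = ln := by
        simp [List.getD, List.getElem?_eq_some_iff] at hg ⊢
        rcases hg with ⟨hl, he⟩; simp [hl, he]
      rw [this]; simpa using h
  | succ r =>
    unfold pvAlive at h
    rcases hg : L[r+1]? with _ | ln
    · simp [hg] at h
    · simp only [hg, Bool.and_eq_true] at h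
      have hok := h.2
      unfold pvOkRow at hok
      rcases hc : ln[c]? with _ | ch
      · simp [hc] at hok
      · have hlt : c < ln.length := (List.getElem?_eq_some_iff.1 hc).1
        have : L.getD (r+1) [] = ln := by
          simp [List.getD, List.getElem?_eq_some_iff] at hg ⊢
          rcases hg with ⟨hl, he⟩; simp [hl, he]
        rw [this]; exact hlt

theorem pvRowL_mem (L : List (List Char)) (p r : Nat) (x y : Int) :
    (x, y) ∈ pvRowL L p r ↔
      ∃ c : Nat, x = (c : Int) ∧ y = (r : Int) ∧
        pvAlive L c r = true ∧ (c + r) % 2 = p := by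
  unfold pvRowL
  simp only [List.mem_filterMap, List.mem_range]
  constructor
  · rintro ⟨c, hc, hsome⟩
    split at hsome
    · rename_i hcond
      exact ⟨c, by injection hsome with h; injection h with h1 h2; exact ⟨h1.symm, h2.symm, hcond.1, hcond.2⟩⟩
    · exact absurd hsome (by simp)
  · rintro ⟨c, hx, hy, ha, hp⟩
    refine ⟨c, ?_, ?_⟩
    · exact pvAlive_inrow L c r ha
    · simp [ha, hp, hx, hy]

theorem pvBlocks_mem (L : List (List Char)) (p k : Nat) (x y : Int) :
    (x, y) ∈ pvBlocks L p k ↔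
      ∃ c r : Nat, r < k ∧ x = (c : Int) ∧ y = (r : Int) ∧
        pvAlive L c r = true ∧ (c + r) % 2 = p := by
  unfold pvBlocks
  simp only [List.mem_flatMap, List.mem_range]
  constructor
  · rintro ⟨r, hr, hm⟩
    obtain ⟨c, hx, hy, ha, hp⟩ := (pvRowL_mem L p r x y).1 hm
    exact ⟨c, r, hr, hx, hy, ha, hp⟩
  · rintro ⟨c, r, hr, hx, hy, ha, hp⟩
    exact ⟨r, hr, (pvRowL_mem L p r x y).2 ⟨c, hx, hy, ha, hp⟩⟩

theorem pvLen_filterMap_range {β : Type} (g : Nat → Option β) (n : Nat) :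
    ((List.range n).filterMap g).length
      = ∑ c ∈ Finset.range n, (if (g c).isSome then 1 else 0) := by
  induction n with
  | zero => simp
  | succ n ih =>
    rw [List.range_succ, List.filterMap_append, Finset.sum_range_succ, List.length_append, ih]
    rcases h : g n with _ | b <;> simp [h]

theorem pvColDown_spec (rows : List (List Char)) (c : Nat) :
    ∀ p, p < 2 → ∀ o e : Int,
      pvColDown rows c p o e
        = (o + ((∑ i ∈ Finset.range (pvChain rows c),
              if (p + 1 + i) % 2 = 1 then 1 else 0 : Nat) : Int),
           e + ((∑ i ∈ Finset.range (pvChain rows c),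
              if (p + 1 + i) % 2 = 0 then 1 else 0 : Nat) : Int)) := by
  induction rows with
  | nil => intro p hp o e; simp [pvColDown, pvChain]
  | cons ln rest ih =>
    intro p hp o e
    unfold pvColDown pvChain pvOkRow
    rcases hc : ln[c]? with _ | ch
    · simp
    · by_cases hch : ch = '#'
      · simp [hch]
      · have hok : (ch != '#') = true := by simp [hch]
        simp only [hch, if_false, hok, if_true]
        have hsplit : ∀ q : Nat, (∑ i ∈ Finset.range (pvChain rest c + 1),
            if (p + 1 + i) % 2 = q then 1 else 0 : Nat)
            = (if (p + 1) % 2 = q then 1 else 0)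
              + ∑ i ∈ Finset.range (pvChain rest c), (if ((1-p) + 1 + i) % 2 = q then 1 else 0 : Nat) := by
          intro q
          rw [Finset.sum_range_succ' (fun i => if (p + 1 + i) % 2 = q then 1 else 0)]
          rw [Nat.add_comm]
          congr 1
          apply Finset.sum_congr rfl
          intro i _
          have harg : (p + 1 + (i + 1)) % 2 = ((1 - p) + 1 + i) % 2 := by omega
          rw [harg]
        by_cases hpar : 1 - p = 0
        · have hp1 : p = 1 := by omega
          have e1 : (if (p + 1) % 2 = 1 then 1 else 0 : Nat) = 0 := by simp [hp1]
          have e0 : (if (p + 1) % 2 = 0 then 1 else 0 : Nat) = 1 := by simp [hp1]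
          rw [if_pos hpar, ih (1-p) (by omega), hsplit 1, hsplit 0, e1, e0,
            Prod.mk.injEq]
          constructor <;> push_cast <;> ring
        · have hp0 : p = 0 := by omega
          have e1 : (if (p + 1) % 2 = 1 then 1 else 0 : Nat) = 1 := by simp [hp0]
          have e0 : (if (p + 1) % 2 = 0 then 1 else 0 : Nat) = 0 := by simp [hp0]
          rw [if_neg hpar, ih (1-p) (by omega), hsplit 1, hsplit 0, e1, e0,
            Prod.mk.injEq]
          constructor <;> push_cast <;> ring

theorem pvCnt_split (l0 : List Char) (rest : List (List Char)) (c p : Nat) (h : c < l0.length) :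
    pvCnt (l0 :: rest) c p
      = (if c % 2 = p then 1 else 0)
        + ∑ i ∈ Finset.range (pvChain rest c), (if (c % 2 + 1 + i) % 2 = p then 1 else 0 : Nat) := by
  unfold pvCnt
  have hrun : pvRun (l0 :: rest) c = pvChain rest c + 1 := by simp [pvRun, h]
  rw [hrun, Finset.sum_range_succ' (fun r => if (c + r) % 2 = p then 1 else 0)]
  have e0 : (if (c + 0) % 2 = p then 1 else 0 : Nat) = (if c % 2 = p then 1 else 0) := by
    rw [show (c + 0) % 2 = c % 2 from by omega]
  have hsum : ∑ i ∈ Finset.range (pvChain rest c), (if (c + (i + 1)) % 2 = p then 1 else 0 : Nat)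
      = ∑ i ∈ Finset.range (pvChain rest c), (if (c % 2 + 1 + i) % 2 = p then 1 else 0 : Nat) :=
    Finset.sum_congr rfl (fun i _ => by
      rw [show (c + (i + 1)) % 2 = (c % 2 + 1 + i) % 2 from by omega])
  rw [e0, hsum, Nat.add_comm]

theorem pvB_main (l0 : List Char) (rest : List (List Char)) :
    ∀ n, n ≤ l0.length →
    (List.range n).foldl
      (fun (acc : Int × Int) c =>
        let parity := c % 2
        let acc' := if parity = 0 then (acc.1, acc.2 + 1) else (acc.1 + 1, acc.2)
        pvColDown rest c parity acc'.1 acc'.2) (0, 0)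
      = (((∑ c ∈ Finset.range n, pvCnt (l0 :: rest) c 1 : Nat) : Int),
         ((∑ c ∈ Finset.range n, pvCnt (l0 :: rest) c 0 : Nat) : Int)) := by
  intro n
  induction n with
  | zero => intro _; simp
  | succ n ih =>
    intro hn
    rw [List.range_succ, List.foldl_append, ih (by omega)]
    simp only [List.foldl_cons, List.foldl_nil]
    rw [pvColDown_spec rest n (n % 2) (by omega)]
    rw [Finset.sum_range_succ, Finset.sum_range_succ,
      pvCnt_split l0 rest n 1 (by omega), pvCnt_split l0 rest n 0 (by omega)]
    by_cases hpar : n % 2 = 0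
    · have e1 : (if n % 2 = 1 then 1 else 0 : Nat) = 0 := by simp [hpar]
      have e0 : (if n % 2 = 0 then 1 else 0 : Nat) = 1 := by simp [hpar]
      rw [if_pos hpar, e1, e0, Prod.mk.injEq]
      constructor <;> push_cast <;> ring
    · have e1 : (if n % 2 = 1 then 1 else 0 : Nat) = 1 := by simp [Nat.mod_two_ne_zero.1 hpar]
      have e0 : (if n % 2 = 0 then 1 else 0 : Nat) = 0 := by simp [hpar]
      rw [if_neg hpar, e1, e0, Prod.mk.injEq]
      constructor <;> push_cast <;> ring

theorem pvSum_list_range (n : Nat) (f : Nat → Nat) :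
    ((List.range n).map f).sum = ∑ i ∈ Finset.range n, f i := by
  induction n with
  | zero => simp
  | succ n ih => rw [List.range_succ, List.map_append, List.sum_append, Finset.sum_range_succ, ih]; simp

theorem pvRowL_len (L : List (List Char)) (p r : Nat) :
    (pvRowL L p r).length
      = ∑ c ∈ Finset.range ((L.getD r []).length),
          (if pvAlive L c r = true ∧ (c + r) % 2 = p then 1 else 0) := by
  unfold pvRowL
  rw [pvLen_filterMap_range]
  apply Finset.sum_congr rfl
  intro c _
  split_ifs <;> simp_all

theorem pvSum_ind_ext (P : Nat → Prop) [DecidablePred P] (a b : Nat)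
    (h : ∀ c, P c → c < a ∧ c < b) :
    (∑ c ∈ Finset.range a, if P c then 1 else 0)
      = ∑ c ∈ Finset.range b, if P c then 1 else 0 := by
  have key : ∀ m n : Nat, (∀ c, P c → c < m) → m ≤ n →
      (∑ c ∈ Finset.range n, if P c then 1 else 0)
        = ∑ c ∈ Finset.range m, if P c then 1 else 0 := by
    intro m n hm hmn
    symm
    apply Finset.sum_subset
    · intro x hx; simp only [Finset.mem_range] at *; omega
    · intro c _ hc
      rw [Finset.mem_range] at hc
      have : ¬ P c := fun hp => hc (hm c hp)
      simp [this]
  rcases Nat.le_total a b with hab | hab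
  · rw [key a b (fun c hc => (h c hc).1) hab]
  · exact key b a (fun c hc => (h c hc).2) hab

theorem pvBlocks_len (l0 : List Char) (rest : List (List Char)) (p : Nat) :
    (pvBlocks (l0 :: rest) p (l0 :: rest).length).length
      = ∑ c ∈ Finset.range l0.length, pvCnt (l0 :: rest) c p := by
  have h1 : (pvBlocks (l0 :: rest) p (l0 :: rest).length).length
      = ∑ r ∈ Finset.range (l0 :: rest).length, (pvRowL (l0 :: rest) p r).length := by
    unfold pvBlocks
    rw [List.length_flatMap, ← pvSum_list_range]
  rw [h1]
  have h2 : ∀ r, (pvRowL (l0 :: rest) p r).length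
      = ∑ c ∈ Finset.range l0.length,
          (if pvAlive (l0 :: rest) c r = true ∧ (c + r) % 2 = p then 1 else 0) := by
    intro r
    rw [pvRowL_len]
    apply pvSum_ind_ext
    intro c hc
    exact ⟨pvAlive_inrow _ _ _ hc.1, pvAlive_width _ _ _ _ hc.1⟩
  simp only [h2]
  rw [Finset.sum_comm]
  apply Finset.sum_congr rfl
  intro c _
  unfold pvCnt
  have hsub : Finset.range (pvRun (l0 :: rest) c) ⊆ Finset.range (l0 :: rest).length := by
    have := pvRun_le_length (l0 :: rest) c
    intro x hx; simp only [Finset.mem_range] at *; omega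
  have hstep : (∑ r ∈ Finset.range (l0 :: rest).length,
        if pvAlive (l0 :: rest) c r = true ∧ (c + r) % 2 = p then 1 else 0)
      = ∑ r ∈ Finset.range (pvRun (l0 :: rest) c),
        if pvAlive (l0 :: rest) c r = true ∧ (c + r) % 2 = p then 1 else 0 := by
    symm
    apply Finset.sum_subset hsub
    intro r _ hr
    rw [Finset.mem_range] at hr
    rw [pvAlive_iff_run]
    simp [hr]
  rw [hstep]
  apply Finset.sum_congr rfl
  intro r hr
  rw [Finset.mem_range] at hr
  rw [pvAlive_iff_run]
  simp [hr]

theorem pvFm_enum {β : Type} (f : Int × Char → Option β) (g : Nat → Option β) :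
    ∀ (cs : List Char) (s : Nat),
      (∀ i (h : i < cs.length), f ((s + i : Nat), cs[i]) = g (s + i)) →
      (PySem.List.enumerate cs (s : Int)).filterMap f = (List.range' s cs.length).filterMap g := by
  intro cs
  induction cs with
  | nil => intro s _; simp [PySem.List.enumerate_nil]
  | cons c cs ih =>
    intro s h
    rw [PySem.List.enumerate_cons]
    have hcast : ((s : Int) + 1) = ((s + 1 : Nat) : Int) := by push_cast; ring
    have h0 := h 0 (by simp)
    simp only [Nat.add_zero, List.getElem_cons_zero] at h0
    have hrest : (PySem.List.enumerate cs ((s + 1 : Nat) : Int)).filterMap f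
        = (List.range' (s + 1) cs.length).filterMap g := by
      apply ih
      intro i hi
      have := h (i + 1) (by simpa using Nat.succ_lt_succ hi)
      simpa [Nat.add_assoc, Nat.add_comm 1 i] using this
    show ((((s : Int)), c) :: PySem.List.enumerate cs ((s : Int) + 1)).filterMap f = _
    rw [hcast]
    have hr : List.range' s (c :: cs).length = s :: List.range' (s + 1) cs.length := by
      simp [List.range'_succ]
    rw [hr]
    simp only [List.filterMap_cons]
    rcases hf : f ((s : Int), c) with _ | b
    · have : g s = none := by
        have := h0; rw [hf] at this; exact this.symm
      rw [this, hrest]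
    · have : g s = some b := by
        have := h0; rw [hf] at this; exact this.symm
      rw [this, hrest]

-- row 0 of A: appends column coordinates by parity

theorem pvRow0_fold (cs : List Char) :
    ∀ (s : Nat) (O E : List (Int × Int)),
      (∀ x : Int, (x, (0:Int)) ∈ O → x < (s : Int)) →
      (∀ x : Int, (x, (0:Int)) ∈ E → x < (s : Int)) →
      (PySem.List.enumerate cs (s : Int)).foldl
        (fun (st : List (Int × Int) × List (Int × Int)) q =>
          if q.1 % 2 = 0 then (st.1, PySem.Set.add st.2 (q.1, (0:Int)))
          else (PySem.Set.add st.1 (q.1, (0:Int)), st.2)) (O, E)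
      = (O ++ (PySem.List.enumerate cs (s : Int)).filterMap
            (fun q => if q.1 % 2 = 0 then none else some (q.1, (0:Int))),
         E ++ (PySem.List.enumerate cs (s : Int)).filterMap
            (fun q => if q.1 % 2 = 0 then some (q.1, (0:Int)) else none)) := by
  induction cs with
  | nil => intro s O E _ _; simp [PySem.List.enumerate_nil]
  | cons c cs ih =>
    intro s O E hO hE
    rw [PySem.List.enumerate_cons]
    have hcast : ((s : Int) + 1) = ((s + 1 : Nat) : Int) := by push_cast; ring
    simp only [List.foldl_cons, List.filterMap_cons]
    by_cases hpar : ((s : Int)) % 2 = 0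
    · rw [if_pos hpar]
      have hfresh : ((s : Int), (0:Int)) ∉ E := fun hm => by have := hE _ hm; omega
      rw [show PySem.Set.add E ((s : Int), (0:Int)) = E ++ [((s : Int), (0:Int))] from
        PySem.Set.add_of_not_mem hfresh]
      rw [hcast]
      rw [ih (s+1) O (E ++ [((s : Int), (0:Int))])
        (fun x hx => by have := hO x hx; push_cast; omega)
        (fun x hx => by
          rcases List.mem_append.1 hx with h | h
          · have := hE x h; push_cast; omega
          · simp at h; push_cast; omega)]
      simp [hpar]
    · rw [if_neg hpar]
      have hfresh : ((s : Int), (0:Int)) ∉ O := fun hm => by have := hO _ hm; omega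
      rw [show PySem.Set.add O ((s : Int), (0:Int)) = O ++ [((s : Int), (0:Int))] from
        PySem.Set.add_of_not_mem hfresh]
      rw [hcast]
      rw [ih (s+1) (O ++ [((s : Int), (0:Int))]) E
        (fun x hx => by
          rcases List.mem_append.1 hx with h | h
          · have := hO x h; push_cast; omega
          · simp at h; push_cast; omega)
        (fun x hx => by have := hE x hx; push_cast; omega)]
      simp [hpar]

theorem pvContains_eq (l : List (Int × Int)) (b : Int → Bool) (y : Int)
    (h : ∀ x : Int, ((x, y) ∈ l) ↔ b x = true) (x : Int) :
    PySem.Set.contains l (x, y) = b x := by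
  rcases hb : b x with _ | _
  · simp only [PySem.Set.contains_eq_listContains]
    rw [← Bool.not_eq_true]
    intro hm
    rw [List.contains_iff_mem] at hm
    have := (h x).1 hm; rw [hb] at this; exact absurd this (by simp)
  · simp only [PySem.Set.contains_eq_listContains]
    rw [List.contains_iff_mem]
    exact (h x).2 hb

-- row r ≥ 1 of A: appends coordinates whose upstairs neighbour is in the other set

theorem pvRowR_fold (k : Int) (_hk : 1 ≤ k) (pe po : Int → Bool) (cs : List Char) :
    ∀ (s : Nat) (O E : List (Int × Int)),
      (∀ x : Int, (x, k) ∈ O → x < (s : Int)) →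
      (∀ x : Int, (x, k) ∈ E → x < (s : Int)) →
      (∀ x : Int, ((x, k - 1) ∈ O) ↔ po x = true) →
      (∀ x : Int, ((x, k - 1) ∈ E) ↔ pe x = true) →
      (PySem.List.enumerate cs (s : Int)).foldl
        (fun (st : List (Int × Int) × List (Int × Int)) q =>
          if q.2 = '#' then st
          else
            let prev : Int × Int := (q.1, k - 1)
            let coord : Int × Int := (q.1, k)
            let odds := if PySem.Set.contains st.2 prev then PySem.Set.add st.1 coord else st.1
            let evens := if PySem.Set.contains odds prev then PySem.Set.add st.2 coord else st.2
            (odds, evens)) (O, E)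
      = (O ++ (PySem.List.enumerate cs (s : Int)).filterMap
            (fun q => if q.2 = '#' then none else if pe q.1 then some (q.1, k) else none),
         E ++ (PySem.List.enumerate cs (s : Int)).filterMap
            (fun q => if q.2 = '#' then none else if po q.1 then some (q.1, k) else none)) := by
  induction cs with
  | nil => intro s O E _ _ _ _; simp [PySem.List.enumerate_nil]
  | cons c cs ih =>
    intro s O E hO hE hpo hpe
    rw [PySem.List.enumerate_cons]
    have hcast : ((s : Int) + 1) = ((s + 1 : Nat) : Int) := by push_cast; ring
    simp only [List.foldl_cons, List.filterMap_cons]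
    by_cases hc : c = '#'
    · rw [if_pos hc, hcast,
        ih (s+1) O E
          (fun x hx => by have := hO x hx; push_cast; omega)
          (fun x hx => by have := hE x hx; push_cast; omega) hpo hpe]
      simp [hc]
    · rw [if_neg hc]
      have hcontE : PySem.Set.contains E ((s : Int), k - 1) = pe (s : Int) :=
        pvContains_eq E pe (k - 1) hpe (s : Int)
      have hfreshO : ((s : Int), k) ∉ O := fun hm => by have := hO _ hm; omega
      have hfreshE : ((s : Int), k) ∉ E := fun hm => by have := hE _ hm; omega
      have hmemO' : ∀ x : Int, ((x, k - 1) ∈ O ++ [((s : Int), k)]) ↔ po x = true := by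
        intro x
        rw [List.mem_append]
        constructor
        · rintro (h | h)
          · exact (hpo x).1 h
          · simp only [List.mem_singleton, Prod.mk.injEq] at h
            exact absurd h.2 (by omega)
        · intro h; exact Or.inl ((hpo x).2 h)
      rw [hcontE]
      rcases hpeS : pe (s : Int) with _ | _
      · -- prev not in evens: odds unchanged
        rw [hpeS] at hcontE
        have hcontO : PySem.Set.contains O ((s : Int), k - 1) = po (s : Int) :=
          pvContains_eq O po (k - 1) hpo (s : Int)
        simp only [if_false, Bool.false_eq_true]
        rw [hcontO]
        rcases hpoS : po (s : Int) with _ | _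
        · simp only [if_false, Bool.false_eq_true]
          rw [hcast, ih (s+1) O E
            (fun x hx => by have := hO x hx; push_cast; omega)
            (fun x hx => by have := hE x hx; push_cast; omega) hpo hpe]
          simp [hc]
        · simp only [if_true]
          rw [show PySem.Set.add E ((s : Int), k) = E ++ [((s : Int), k)] from
            PySem.Set.add_of_not_mem hfreshE]
          have hmemE' : ∀ x : Int, ((x, k - 1) ∈ E ++ [((s : Int), k)]) ↔ pe x = true := by
            intro x
            rw [List.mem_append]
            constructor
            · rintro (h | h)
              · exact (hpe x).1 h
              · simp only [List.mem_singleton, Prod.mk.injEq] at h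
                exact absurd h.2 (by omega)
            · intro h; exact Or.inl ((hpe x).2 h)
          rw [hcast, ih (s+1) O (E ++ [((s : Int), k)])
            (fun x hx => by have := hO x hx; push_cast; omega)
            (fun x hx => by
              rcases List.mem_append.1 hx with h | h
              · have := hE x h; push_cast; omega
              · simp only [List.mem_singleton, Prod.mk.injEq] at h
                push_cast; omega) hpo hmemE']
          simp [hc]
      · -- prev in evens: coord goes to odds
        rw [hpeS] at hcontE
        simp only [if_true]
        rw [show PySem.Set.add O ((s : Int), k) = O ++ [((s : Int), k)] from
          PySem.Set.add_of_not_mem hfreshO]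
        have hcontO' : PySem.Set.contains (O ++ [((s : Int), k)]) ((s : Int), k - 1) = po (s : Int) :=
          pvContains_eq _ po (k - 1) hmemO' (s : Int)
        rw [hcontO']
        have hO' : ∀ x : Int, (x, k) ∈ O ++ [((s : Int), k)] → x < ((s+1 : Nat) : Int) := by
          intro x hx
          rcases List.mem_append.1 hx with h | h
          · have := hO x h; push_cast; omega
          · simp only [List.mem_singleton, Prod.mk.injEq] at h
            push_cast; omega
        rcases hpoS : po (s : Int) with _ | _
        · simp only [if_false, Bool.false_eq_true]
          rw [hcast, ih (s+1) (O ++ [((s : Int), k)]) E hO'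
            (fun x hx => by have := hE x hx; push_cast; omega) hmemO' hpe]
          simp [hc]
        · simp only [if_true]
          rw [show PySem.Set.add E ((s : Int), k) = E ++ [((s : Int), k)] from
            PySem.Set.add_of_not_mem hfreshE]
          have hmemE' : ∀ x : Int, ((x, k - 1) ∈ E ++ [((s : Int), k)]) ↔ pe x = true := by
            intro x
            rw [List.mem_append]
            constructor
            · rintro (h | h)
              · exact (hpe x).1 h
              · simp only [List.mem_singleton, Prod.mk.injEq] at h
                exact absurd h.2 (by omega)
            · intro h; exact Or.inl ((hpe x).2 h)
          rw [hcast, ih (s+1) (O ++ [((s : Int), k)]) (E ++ [((s : Int), k)]) hO'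
            (fun x hx => by
              rcases List.mem_append.1 hx with h | h
              · have := hE x h; push_cast; omega
              · simp only [List.mem_singleton, Prod.mk.injEq] at h
                push_cast; omega) hmemO' hmemE']
          simp [hc]

theorem pvConv_row0 (cs : List Char) (rest' : List (List Char)) (p : Nat) (hp : p < 2) :
    (PySem.List.enumerate cs (0 : Int)).filterMap
        (fun q => if q.1 % 2 = 0 then (if p = 1 then none else some (q.1, (0:Int)))
                  else (if p = 1 then some (q.1, (0:Int)) else none))
      = pvRowL (cs :: rest') p 0 := by
  unfold pvRowL
  have h := pvFm_enum
    (fun q => if q.1 % 2 = 0 then (if p = 1 then none else some (q.1, (0:Int)))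
              else (if p = 1 then some (q.1, (0:Int)) else none))
    (fun c => if pvAlive (cs :: rest') c 0 ∧ (c + 0) % 2 = p then some ((c : Int), ((0:Nat) : Int)) else none)
    cs 0 ?_
  · rw [show ((0:Nat) : Int) = (0 : Int) from by norm_num] at h
    rw [h, ← List.range_eq_range']
    apply List.filterMap_congr
    intro c _
    norm_num
  · intro i hi
    have halive : pvAlive (cs :: rest') (0 + i) 0 = true := by
      unfold pvAlive
      simp [hi]
    simp only [Nat.zero_add] at halive ⊢
    rw [halive]
    have hmod : ((i : Int)) % 2 = ((i % 2 : Nat) : Int) := by omega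
    interval_cases p
    · by_cases he : i % 2 = 0
      · have : ((i : Int)) % 2 = 0 := by omega
        simp [this, he]
      · have : ¬ (((i : Int)) % 2 = 0) := by omega
        simp [this, he]
    · by_cases he : i % 2 = 1
      · have : ¬ (((i : Int)) % 2 = 0) := by omega
        simp [this, he]
      · have : ((i : Int)) % 2 = 0 := by omega
        simp [this, he]

theorem pvConv_row0_odd (cs : List Char) (rest' : List (List Char)) :
    (PySem.List.enumerate cs (0 : Int)).filterMap
        (fun q => if q.1 % 2 = 0 then none else some (q.1, (0:Int)))
      = pvRowL (cs :: rest') 1 0 := by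
  have h := pvConv_row0 cs rest' 1 (by omega)
  have he : (fun q : Int × Char => if q.1 % 2 = 0 then (if 1 = 1 then none else some (q.1, (0:Int)))
        else (if 1 = 1 then some (q.1, (0:Int)) else none))
      = (fun q : Int × Char => if q.1 % 2 = 0 then none else some (q.1, (0:Int))) := by
    funext q; by_cases hq : q.1 % 2 = 0 <;> simp [hq]
  rwa [he] at h

theorem pvConv_row0_even (cs : List Char) (rest' : List (List Char)) :
    (PySem.List.enumerate cs (0 : Int)).filterMap
        (fun q => if q.1 % 2 = 0 then some (q.1, (0:Int)) else none)
      = pvRowL (cs :: rest') 0 0 := by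
  have h := pvConv_row0 cs rest' 0 (by omega)
  have he : (fun q : Int × Char => if q.1 % 2 = 0 then (if 0 = 1 then none else some (q.1, (0:Int)))
        else (if 0 = 1 then some (q.1, (0:Int)) else none))
      = (fun q : Int × Char => if q.1 % 2 = 0 then some (q.1, (0:Int)) else none) := by
    funext q; by_cases hq : q.1 % 2 = 0 <;> simp [hq]
  rwa [he] at h

theorem pvConv_rowR (L : List (List Char)) (k : Nat) (hk1 : 1 ≤ k) (hkL : k < L.length)
    (cs : List Char) (hcs : L.getD k [] = cs) (p q : Nat) (hp : p < 2) (hq : q = 1 - p) :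
    (PySem.List.enumerate cs (0 : Int)).filterMap
        (fun w => if w.2 = '#' then none
                  else if (decide ((w.1, (k : Int) - 1) ∈ pvBlocks L q k)) then some (w.1, (k : Int)) else none)
      = pvRowL L p k := by
  unfold pvRowL
  rw [hcs]
  have h := pvFm_enum
    (fun w => if w.2 = '#' then none
              else if (decide ((w.1, (k : Int) - 1) ∈ pvBlocks L q k)) then some (w.1, (k : Int)) else none)
    (fun c => if pvAlive L c k ∧ (c + k) % 2 = p then some ((c : Int), (k : Int)) else none)
    cs 0 ?_
  · rw [show ((0:Nat) : Int) = (0 : Int) from by norm_num] at h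
    rw [h, ← List.range_eq_range']
  · intro i hi
    simp only [Nat.zero_add]
    have hLk : L[k]? = some cs := by
      rw [List.getElem?_eq_some_iff]
      refine ⟨hkL, ?_⟩
      have := hcs
      rwa [List.getD, List.getElem?_eq_getElem hkL] at this
    have halive : pvAlive L i k = (pvAlive L i (k - 1) && pvOkRow cs i) := by
      rcases Nat.exists_eq_add_of_le hk1 with ⟨k', rfl⟩
      have h2 : 1 + k' = k' + 1 := by omega
      rw [h2] at hLk ⊢
      have he : k' + 1 - 1 = k' := by omega
      rw [he]
      show pvAlive L i (k' + 1) = _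
      conv_lhs => unfold pvAlive
      simp [hLk]
    by_cases hch : cs[i] = '#'
    · rw [if_pos hch]
      have hok : pvOkRow cs i = false := by
        unfold pvOkRow
        rw [List.getElem?_eq_getElem hi, hch]
        simp
      rw [halive, hok]
      simp
    · rw [if_neg hch]
      have hok : pvOkRow cs i = true := by
        unfold pvOkRow
        rw [List.getElem?_eq_getElem hi]
        simp [hch]
      have hmem : ((i : Int), (k : Int) - 1) ∈ pvBlocks L q k
          ↔ (pvAlive L i (k - 1) = true ∧ (i + (k - 1)) % 2 = q) := by
        rw [pvBlocks_mem]
        constructor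
        · rintro ⟨c', r', hr', hx, hy, ha, hpar⟩
          have hc' : c' = i := by omega
          have hr'' : r' = k - 1 := by omega
          subst hc'; subst hr''
          exact ⟨ha, hpar⟩
        · rintro ⟨ha, hpar⟩
          exact ⟨i, k - 1, by omega, rfl, by omega, ha, hpar⟩
      have hparity : ((i + (k - 1)) % 2 = q) ↔ ((i + k) % 2 = p) := by omega
      by_cases hcond : pvAlive L i (k - 1) = true ∧ (i + k) % 2 = p
      · have hmem' : ((i : Int), (k : Int) - 1) ∈ pvBlocks L q k :=
          hmem.2 ⟨hcond.1, hparity.2 hcond.2⟩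
        rw [halive, hok]
        simp [hmem', hcond.1, hcond.2]
      · have hmem' : ¬ (((i : Int), (k : Int) - 1) ∈ pvBlocks L q k) := by
          intro hm
          obtain ⟨ha, hpar⟩ := hmem.1 hm
          exact hcond ⟨ha, hparity.1 hpar⟩
        rw [halive, hok]
        by_cases ha : pvAlive L i (k - 1) = true
        · have : ¬ ((i + k) % 2 = p) := fun hpp => hcond ⟨ha, hpp⟩
          simp [hmem', ha, this]
        · simp [hmem', ha]

theorem pvBlocks_succ (L : List (List Char)) (p k : Nat) :
    pvBlocks L p (k + 1) = pvBlocks L p k ++ pvRowL L p k := by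
  unfold pvBlocks
  rw [List.range_succ, List.flatMap_append]
  simp

theorem pvBlocks_fresh (L : List (List Char)) (p k : Nat) (x : Int) :
    (x, (k : Int)) ∈ pvBlocks L p k → x < ((0:Nat) : Int) := by
  intro hm
  rw [pvBlocks_mem] at hm
  obtain ⟨c, r, hr, _, hy, _, _⟩ := hm
  omega

theorem pvA_fold (lines : List String) : ∀ k, k ≤ lines.length →
    (PySem.List.enumerate (lines.take k) 0).foldl pvAStep (PySem.Set.empty, PySem.Set.empty)
      = (pvBlocks (lines.map String.toList) 1 k, pvBlocks (lines.map String.toList) 0 k) := by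
  intro k
  induction k with
  | zero => intro _; simp [PySem.List.enumerate_nil, pvBlocks, PySem.Set.empty]
  | succ k ih =>
    intro hk
    have hkl : k < lines.length := by omega
    have htake : lines.take (k + 1) = lines.take k ++ [lines[k]] := by
      rw [List.take_add_one, List.getElem?_eq_getElem hkl]
      rfl
    rw [htake, PySem.List.enumerate_append, List.foldl_append, ih (by omega)]
    have hlen : ((0:Int) + (lines.take k).length) = (k : Int) := by
      rw [List.length_take]
      push_cast
      omega
    rw [hlen, PySem.List.enumerate_cons, PySem.List.enumerate_nil]
    simp only [List.foldl_cons, List.foldl_nil]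
    have hgetD : (lines.map String.toList).getD k [] = lines[k].toList := by
      rw [List.getD, List.getElem?_map, List.getElem?_eq_getElem hkl]
      rfl
    rcases Nat.eq_zero_or_pos k with hk0 | hkpos
    · subst hk0
      show pvAStep (pvBlocks (lines.map String.toList) 1 0,
        pvBlocks (lines.map String.toList) 0 0) ((0:Int), lines[0]) = _
      have hb0 : ∀ p, pvBlocks (lines.map String.toList) p 0 = [] := by
        intro p; simp [pvBlocks]
      rw [hb0, hb0]
      unfold pvAStep
      rw [if_pos rfl]
      have hrow := pvRow0_fold lines[0].toList 0 [] [] (by simp) (by simp)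
      simp only [Nat.cast_zero] at hrow
      rw [hrow]
      have hcons : lines.map String.toList
          = lines[0].toList :: (lines.drop 1).map String.toList := by
        cases lines with
        | nil => simp at hkl
        | cons a as => simp
      have hc1 := pvConv_row0_odd lines[0].toList ((lines.drop 1).map String.toList)
      have hc0 := pvConv_row0_even lines[0].toList ((lines.drop 1).map String.toList)
      rw [pvBlocks_succ, pvBlocks_succ, hb0, hb0, hcons, hc1, hc0]
    · have hkne : ((k : Int)) ≠ 0 := by omega
      show pvAStep (pvBlocks (lines.map String.toList) 1 k,
        pvBlocks (lines.map String.toList) 0 k) ((k : Int), lines[k]) = _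
      unfold pvAStep
      rw [if_neg hkne]
      have hrow := pvRowR_fold (k : Int) (by omega)
        (fun x => decide ((x, (k : Int) - 1) ∈ pvBlocks (lines.map String.toList) 0 k))
        (fun x => decide ((x, (k : Int) - 1) ∈ pvBlocks (lines.map String.toList) 1 k))
        lines[k].toList 0 (pvBlocks (lines.map String.toList) 1 k)
        (pvBlocks (lines.map String.toList) 0 k)
        (fun x hx => pvBlocks_fresh _ 1 k x hx)
        (fun x hx => pvBlocks_fresh _ 0 k x hx)
        (fun x => by simp)
        (fun x => by simp)
      simp only [Nat.cast_zero] at hrow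
      rw [hrow]
      have hkL : k < (lines.map String.toList).length := by simpa using hkl
      have hc1 := pvConv_rowR (lines.map String.toList) k (by omega) hkL
        lines[k].toList hgetD 1 0 (by omega) (by omega)
      have hc0 := pvConv_rowR (lines.map String.toList) k (by omega) hkL
        lines[k].toList hgetD 0 1 (by omega) (by omega)
      rw [hc1, hc0, pvBlocks_succ, pvBlocks_succ]

theorem pvFinal (lines : List String) :
    count_odds_and_evens lines = count_odds_and_evens_alt lines := by
  cases lines with
  | nil => rfl
  | cons l0 rest =>
    have hA := pvA_fold (l0 :: rest) (l0 :: rest).length (le_refl _)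
    rw [List.take_length] at hA
    unfold count_odds_and_evens
    rw [hA]
    have hmap : (l0 :: rest).map String.toList = l0.toList :: rest.map String.toList := rfl
    rw [hmap] at *
    have hlen1 : ∀ l : List (Int × Int), PySem.Set.len l = (l.length : Int) := fun l => rfl
    show (((pvBlocks (l0.toList :: rest.map String.toList) 1 (l0 :: rest).length).length : Int),
          ((pvBlocks (l0.toList :: rest.map String.toList) 0 (l0 :: rest).length).length : Int))
        = count_odds_and_evens_alt (l0 :: rest)
    have hR : (l0 :: rest).length = (l0.toList :: rest.map String.toList).length := by simp
    rw [hR, pvBlocks_len, pvBlocks_len]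
    have halt : count_odds_and_evens_alt (l0 :: rest)
        = (List.range l0.toList.length).foldl
            (fun (acc : Int × Int) c =>
              let parity := c % 2
              let acc' := if parity = 0 then (acc.1, acc.2 + 1) else (acc.1 + 1, acc.2)
              pvColDown (rest.map String.toList) c parity acc'.1 acc'.2)
            (0, 0) := rfl
    rw [halt, pvB_main l0.toList (rest.map String.toList) l0.toList.length (le_refl _)]

-- ===== VERDICT (by name: the statement is the Claim_ definition above) =====
theorem count_odds_and_evens_spec : Claim_equal_count_odds_and_evens := by
  intro lines _
  show count_odds_and_evens lines = count_odds_and_evens_alt lines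
  exact pvFinal lines
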